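-- pv_equiv track=rewrite | github.com/darcyjds-trip/wordwheel | scripts/generate_word_paths.py | build_yellow_edges
-- ===== SOURCE A (Python) =====
-- from collections import defaultdict
-- from typing import Callable, DefaultDict, Iterable
--
-- MIN_WORD_LENGTH = 4
--
-- MAX_WORD_LENGTH = 9
--
-- def is_subsequence(source: str, target: str) -> bool:
--     source_index = 0
--     target_index = 0
--     while source_index < len(source) and target_index < len(target):
--         if source[source_index] == target[target_index]:
--             source_index += 1
--         target_index += 1
--     return source_index == len(source)
--
-- def is_yellow_move(previous: str, next_word: str) -> bool:
--     return len(next_word) == len(previous) + 1 and is_subsequence(previous, next_word)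
--
-- def build_yellow_edges(words_by_length: dict[int, list[str]]) -> dict[str, list[str]]:
--     edges: DefaultDict[str, set[str]] = defaultdict(set)
--     for length in range(MIN_WORD_LENGTH, MAX_WORD_LENGTH):
--         shorter_words = words_by_length.get(length, [])
--         longer_words = words_by_length.get(length + 1, [])
--         if not shorter_words or not longer_words:
--             continue
--         for shorter in shorter_words:
--             for longer in longer_words:
--                 if is_yellow_move(shorter, longer):
--                     edges[shorter].add(longer)
--     return {word: sorted(neighbors) for word, neighbors in edges.items()}
-- ===== SOURCE B (Python) =====
-- MIN_WORD_LENGTH = 4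
-- MAX_WORD_LENGTH = 9
--
--
-- def build_yellow_edges(words_by_length):
--     edges = {}
--     for length in range(MIN_WORD_LENGTH, MAX_WORD_LENGTH):
--         shorter_words = words_by_length.get(length, [])
--         longer_words = words_by_length.get(length + 1, [])
--         shorter_set = set(shorter_words)
--         # index: deletion string -> set of longer words having it as a one-char deletion
--         hits = {}
--         for longer in longer_words:
--             for i in range(len(longer)):
--                 d = longer[:i] + longer[i + 1:]
--                 if d in shorter_set:
--                     hits.setdefault(d, set()).add(longer)
--         for shorter in shorter_words:
--             if shorter in hits:
--                 edges.setdefault(shorter, set()).update(hits[shorter])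
--     return {word: sorted(neighbors) for word, neighbors in edges.items()}
-- ===== Notes on version B (the rewrite author's own statement) =====
-- stated objective: alternative
-- what changed: Instead of testing every (shorter, longer) pair with a two-pointer subsequence scan, B enumerates each longer word's L single-character deletions and looks them up in a hash set of the shorter words, then assembles the edge dict in the shorter-word order A produces.
import Mathlib
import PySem

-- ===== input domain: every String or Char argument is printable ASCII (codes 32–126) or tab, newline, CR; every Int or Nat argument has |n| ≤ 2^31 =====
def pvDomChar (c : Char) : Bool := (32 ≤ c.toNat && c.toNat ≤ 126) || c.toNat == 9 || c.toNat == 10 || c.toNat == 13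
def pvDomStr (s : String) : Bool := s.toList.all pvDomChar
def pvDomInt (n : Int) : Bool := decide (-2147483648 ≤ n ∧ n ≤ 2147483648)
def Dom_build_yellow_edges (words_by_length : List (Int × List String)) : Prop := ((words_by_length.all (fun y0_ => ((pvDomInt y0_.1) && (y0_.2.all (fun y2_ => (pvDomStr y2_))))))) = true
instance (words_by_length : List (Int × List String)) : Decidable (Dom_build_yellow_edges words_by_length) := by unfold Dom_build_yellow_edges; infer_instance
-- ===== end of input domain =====

-- B replaces A's all-pairs two-pointer subsequence test by a per-block deletion index:
-- each longer word's one-character deletions are looked up in a set of the shorter words;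
-- the return value is identical.

-- ===== PORT A =====
def pvMIN_WORD_LENGTH : Int := 4
def pvMAX_WORD_LENGTH : Int := 9

-- the two-pointer while loop of is_subsequence, with the two index positions replaced by
-- the corresponding suffix lists (same steps, same comparisons)
def pvSubseqLoop : List Char → List Char → Bool
  | [], _ => true
  | _ :: _, [] => false
  | s :: ss, t :: ts => if s = t then pvSubseqLoop ss ts else pvSubseqLoop (s :: ss) ts

def is_subsequence (source target : String) : Bool :=
  pvSubseqLoop source.toList target.toList

def is_yellow_move (previous next_word : String) : Bool :=
  PySem.Str.len next_word == PySem.Str.len previous + 1 && is_subsequence previous next_word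

def build_yellow_edges (words_by_length : List (Int × List String)) : List (String × List String) :=
  let d := PySem.Dict.mk words_by_length
  let edges : PySem.Dict String (PySem.Set String) :=
    (PySem.List.pyRange pvMIN_WORD_LENGTH pvMAX_WORD_LENGTH 1).foldl (fun edges length =>
      let shorter_words := d.getD length []
      let longer_words := d.getD (length + 1) []
      if shorter_words = [] ∨ longer_words = [] then edges
      else
        shorter_words.foldl (fun edges shorter =>
          longer_words.foldl (fun edges longer =>
            if is_yellow_move shorter longer then
              -- defaultdict access edges[shorter] followed by .add(longer)
              edges.insert shorter ((edges.getD shorter PySem.Set.empty).add longer)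
            else edges) edges) edges) PySem.Dict.empty
  edges.items.map (fun p => (p.1, PySem.List.sorted p.2 (fun x => x) false))

-- ===== PORT B =====
-- longer[:i] + longer[i+1:] for i in range(len(longer))
def pvDeletions (cs : List Char) : List String :=
  (PySem.List.pyRange 0 (cs.length : Int) 1).map (fun i =>
    String.ofList (PySem.List.slice cs none (some i) ++ PySem.List.slice cs (some (i + 1)) none))

def build_yellow_edges_alt (words_by_length : List (Int × List String)) : List (String × List String) :=
  let d := PySem.Dict.mk words_by_length
  let edges : PySem.Dict String (PySem.Set String) :=
    (PySem.List.pyRange pvMIN_WORD_LENGTH pvMAX_WORD_LENGTH 1).foldl (fun edges length =>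
      let shorter_words := d.getD length []
      let longer_words := d.getD (length + 1) []
      let shorter_set := PySem.Set.ofList shorter_words
      let hits : PySem.Dict String (PySem.Set String) :=
        longer_words.foldl (fun hits longer =>
          (pvDeletions longer.toList).foldl (fun hits del =>
            if shorter_set.contains del then
              hits.insert del ((hits.getD del PySem.Set.empty).add longer)
            else hits) hits) PySem.Dict.empty
      shorter_words.foldl (fun edges shorter =>
        match hits.get? shorter with
        | some ns => edges.insert shorter ((edges.getD shorter PySem.Set.empty).update ns)
        | none => edges) edges) PySem.Dict.empty
  edges.items.map (fun p => (p.1, PySem.List.sorted p.2 (fun x => x) false))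

-- ===== PRECONDITION & SPEC =====
def Spec_build_yellow_edges (words_by_length : List (Int × List String)) (out : List (String × List String)) : Prop := out = build_yellow_edges_alt words_by_length
instance (words_by_length : List (Int × List String)) (out : List (String × List String)) : Decidable (Spec_build_yellow_edges words_by_length out) := by unfold Spec_build_yellow_edges; infer_instance

-- ===== CLAIM (what is proved, stated in full; the proofs are below) =====
def Claim_equal_build_yellow_edges : Prop := ∀ (words_by_length : List (Int × List String)), Dom_build_yellow_edges words_by_length → Spec_build_yellow_edges words_by_length (build_yellow_edges words_by_length)

-- ===== LEMMAS AND PROOFS =====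

theorem pvSubseqLoop_iff_sublist (s t : List Char) :
    pvSubseqLoop s t = true ↔ s.Sublist t := by
  induction t generalizing s with
  | nil => cases s <;> simp [pvSubseqLoop]
  | cons c ts ih =>
    cases s with
    | nil => simp [pvSubseqLoop]
    | cons a ss =>
      by_cases h : a = c
      · subst h
        simp [pvSubseqLoop, ih, List.cons_sublist_cons]
      · simp only [pvSubseqLoop, if_neg h, ih]
        rw [List.sublist_cons_iff]
        constructor
        · exact Or.inl
        · rintro (hs | ⟨r, hr, _⟩)
          · exact hs
          · exact absurd (by injection hr) h
theorem sublist_len_succ_of_deletion (s t : List Char) :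
    (∃ i < t.length, t.take i ++ t.drop (i + 1) = s) → s.Sublist t ∧ t.length = s.length + 1 := by
  rintro ⟨i, hi, rfl⟩
  constructor
  · conv_rhs => rw [← List.take_append_drop i t]
    have : (t.drop (i + 1)).Sublist (t.drop i) := by
      rw [← List.tail_drop]
      exact List.tail_sublist _
    exact this.append_left _
  · simp [List.length_take, List.length_drop]
    omega
theorem deletion_of_sublist_len_succ (s t : List Char) :
    s.Sublist t → t.length = s.length + 1 → ∃ i < t.length, t.take i ++ t.drop (i + 1) = s := by
  induction t generalizing s with
  | nil => intro _ h; exfalso; simp at h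
  | cons c ts ih =>
    intro hsub hlen
    rcases List.sublist_cons_iff.mp hsub with h | ⟨r, rfl, hr⟩
    · exact ⟨0, by simp, by simpa using (h.eq_of_length (by simp at hlen; omega)).symm⟩
    · obtain ⟨i, hi, he⟩ := ih r hr (by simp at hlen; omega)
      exact ⟨i + 1, by simpa using hi, by simpa using he⟩


theorem pvDeletions_eq (cs : List Char) :
    pvDeletions cs = (List.range cs.length).map (fun i => String.ofList (cs.take i ++ cs.drop (i + 1))) := by
  unfold pvDeletions
  rw [PySem.List.pyRange_zero_natCast, List.map_map]
  refine List.map_congr_left (fun i _ => ?_)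
  simp only [Function.comp_apply, PySem.List.slice_to_natCast]
  rw [show ((i : Int) + 1) = ((i + 1 : Nat) : Int) by push_cast; ring, PySem.List.slice_from_natCast]



theorem yellow_iff_mem_deletions (s l : String) :
    is_yellow_move s l = true ↔ s ∈ pvDeletions l.toList := by
  rw [pvDeletions_eq]
  simp only [is_yellow_move, is_subsequence, Bool.and_eq_true, beq_iff_eq, PySem.Str.len_eq,
    pvSubseqLoop_iff_sublist, List.mem_map, List.mem_range]
  constructor
  · rintro ⟨hlen, hsub⟩
    obtain ⟨i, hi, he⟩ := deletion_of_sublist_len_succ _ _ hsub (by omega)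
    exact ⟨i, hi, by rw [he]; exact String.ofList_toList⟩
  · rintro ⟨i, hi, he⟩
    have h := sublist_len_succ_of_deletion s.toList l.toList
      ⟨i, hi, by rw [← he]; simp⟩
    exact ⟨by omega, h.1⟩

def pvIns (e : PySem.Dict String (PySem.Set String)) (s l : String) : PySem.Dict String (PySem.Set String) :=
  e.insert s ((e.getD s PySem.Set.empty).add l)

theorem set_add_of_mem {v : PySem.Set String} {x : String} (h : x ∈ v) : v.add x = v := by
  simp [PySem.Set.add]
  exact h

theorem update_ofList (M : List String) (v : PySem.Set String) :
    v.update (PySem.Set.ofList M) = v.update M := by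
  induction M using List.reverseRecOn with
  | nil => rfl
  | append_singleton M m ih =>
    have hof : PySem.Set.ofList (M ++ [m]) = (PySem.Set.ofList M).add m := by
      show (M ++ [m]).foldl PySem.Set.add PySem.Set.empty = _
      rw [List.foldl_append]; rfl
    have hupd : ∀ (w : PySem.Set String), v.update (w ++ [m]) = (v.update w).add m := by
      intro w; show (w ++ [m]).foldl PySem.Set.add v = _
      rw [List.foldl_append]; rfl
    by_cases hm : m ∈ PySem.Set.ofList M
    · have : (PySem.Set.ofList M).add m = PySem.Set.ofList M := set_add_of_mem hm
      rw [hof, this, ih, hupd]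
      have hmM : m ∈ M := (PySem.Set.mem_ofList M m).mp hm
      have : m ∈ v.update M := (PySem.Set.mem_update v M m).mpr (Or.inr hmM)
      rw [set_add_of_mem this]
    · have : PySem.Set.ofList M ++ [m] = (PySem.Set.ofList M).add m := by
        simp [PySem.Set.add]
        exact fun hc => hm ((PySem.Set.mem_ofList M m).mpr hc)
      rw [hof, ← this, hupd, hupd, ih]

theorem foldl_pvIns (M : List String) (s : String) : ∀ e,
    M.foldl (fun e l => pvIns e s l) e
      = if M = [] then e else e.insert s ((e.getD s PySem.Set.empty).update M) := by
  induction M with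
  | nil => intro e; rfl
  | cons l M' ih =>
    intro e
    simp only [List.foldl_cons, ih]
    by_cases hM : M' = []
    · subst hM; rfl
    · simp only [if_neg hM, if_neg (List.cons_ne_nil l M')]
      show (pvIns e s l).insert s (((pvIns e s l).getD s PySem.Set.empty).update M') = _
      rw [pvIns, PySem.Dict.getD_insert, if_pos rfl, PySem.Dict.insert_insert_self]
      rfl

theorem inner_get? (Sset : PySem.Set String) (l s : String) : ∀ (ds : List String) (h : PySem.Dict String (PySem.Set String)),
    (ds.foldl (fun h del => if Sset.contains del then pvIns h del l else h) h).get? s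
      = if Sset.contains s && ds.contains s then some ((h.getD s PySem.Set.empty).add l)
        else h.get? s := by
  intro ds
  induction ds with
  | nil => intro h; simp
  | cons d ds' ih =>
    intro h
    simp only [List.foldl_cons]
    by_cases hds : d = s
    · subst hds
      by_cases hc : Sset.contains d = true
      · rw [if_pos hc, ih]
        have hg : (pvIns h d l).get? d = some ((h.getD d PySem.Set.empty).add l) := by
          rw [pvIns, PySem.Dict.get?_insert, if_pos rfl]
        have h1 : (pvIns h d l).getD d PySem.Set.empty = (h.getD d PySem.Set.empty).add l := by
          rw [pvIns, PySem.Dict.getD_insert, if_pos rfl]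
        by_cases hd2 : ds'.contains d = true
        · rw [if_pos (by rw [hc, hd2]; simp), h1,
            set_add_of_mem ((PySem.Set.mem_add _ l l).mpr (Or.inr rfl)),
            if_pos (by rw [hc]; simp)]
        · rw [if_neg (by intro hcontr; rw [(by simpa using hd2 : ds'.contains d = false)] at hcontr; simp at hcontr), hg,
            if_pos (by rw [hc]; simp)]
      · rw [if_neg hc, ih]
        have hb : Sset.contains d = false := by simpa using hc
        rw [if_neg (by intro hcontr; rw [hb] at hcontr; simp at hcontr), if_neg (by intro hcontr; rw [hb] at hcontr; simp at hcontr)]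
    · have hstep : ∀ h' : PySem.Dict String (PySem.Set String),
          (if Sset.contains d = true then pvIns h' d l else h').get? s = h'.get? s := by
        intro h'
        by_cases hc : Sset.contains d = true
        · rw [if_pos hc, pvIns, PySem.Dict.get?_insert, if_neg (Ne.symm hds)]
        · rw [if_neg hc]
      have hstepD : ∀ h' : PySem.Dict String (PySem.Set String),
          (if Sset.contains d = true then pvIns h' d l else h').getD s PySem.Set.empty = h'.getD s PySem.Set.empty := by
        intro h'
        rw [PySem.Dict.getD_eq_get?_getD, hstep, ← PySem.Dict.getD_eq_get?_getD]
      rw [ih, hstepD, hstep]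
      have hcc : (d :: ds').contains s = ds'.contains s := by
        simp only [List.contains_cons, beq_eq_false_iff_ne.mpr (Ne.symm hds), Bool.false_or]
      rw [hcc]

def pvP (Sset : PySem.Set String) (s l : String) : Bool :=
  Sset.contains s && (pvDeletions l.toList).contains s

theorem hits_spec (Sset : PySem.Set String) (s : String) : ∀ (L : List String) (h : PySem.Dict String (PySem.Set String)),
    ((L.foldl (fun h longer => (pvDeletions longer.toList).foldl
        (fun h del => if Sset.contains del then pvIns h del longer else h) h) h).get? s
      = if L.any (pvP Sset s) then some ((h.getD s PySem.Set.empty).update (L.filter (pvP Sset s))) else h.get? s)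
    ∧ ((L.foldl (fun h longer => (pvDeletions longer.toList).foldl
        (fun h del => if Sset.contains del then pvIns h del longer else h) h) h).getD s PySem.Set.empty
      = (h.getD s PySem.Set.empty).update (L.filter (pvP Sset s))) := by
  intro L
  induction L with
  | nil => intro h; exact ⟨by simp, rfl⟩
  | cons l L' ih =>
    intro h
    simp only [List.foldl_cons]
    have hg := inner_get? Sset l s (pvDeletions l.toList) h
    have hgD : ((pvDeletions l.toList).foldl (fun h del => if Sset.contains del then pvIns h del l else h) h).getD s PySem.Set.empty
        = if pvP Sset s l then (h.getD s PySem.Set.empty).add l else h.getD s PySem.Set.empty := by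
      rw [PySem.Dict.getD_eq_get?_getD, hg, pvP]
      by_cases hp : (Sset.contains s && (pvDeletions l.toList).contains s) = true
      · rw [if_pos hp, if_pos hp]; rfl
      · rw [if_neg hp, if_neg hp, ← PySem.Dict.getD_eq_get?_getD]
    obtain ⟨ih1, ih2⟩ := ih (((pvDeletions l.toList)).foldl (fun h del => if Sset.contains del then pvIns h del l else h) h)
    by_cases hp : pvP Sset s l = true
    · have hany : (l :: L').any (pvP Sset s) = true := by simp [List.any_cons, hp]
      have hfil : (l :: L').filter (pvP Sset s) = l :: L'.filter (pvP Sset s) := by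
        simp [hp]
      have hupd : ∀ M, (h.getD s PySem.Set.empty).update (l :: M) = ((h.getD s PySem.Set.empty).add l).update M := fun _ => rfl
      refine ⟨?_, ?_⟩
      · rw [ih1, hgD, if_pos hp, hany, if_pos rfl, hfil, hupd]
        by_cases ha' : L'.any (pvP Sset s) = true
        · rw [if_pos ha']
        · rw [if_neg ha', hg, if_pos (by simpa only [pvP] using hp)]
          have : L'.filter (pvP Sset s) = [] := by
            rw [List.filter_eq_nil_iff]
            intro a haL
            have := (List.any_eq_false.mp (by simpa using ha')) a haL
            simpa using this
          rw [this]; rfl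
      · rw [ih2, hgD, if_pos hp, hfil, hupd]
    · have hpf : pvP Sset s l = false := by simpa using hp
      have hany : (l :: L').any (pvP Sset s) = L'.any (pvP Sset s) := by
        simp [List.any_cons, hpf]
      have hfil : (l :: L').filter (pvP Sset s) = L'.filter (pvP Sset s) := by
        simp [hpf]
      have hpf' : ¬ (Sset.contains s && (pvDeletions l.toList).contains s) = true := by
        rw [← pvP]; simp [hpf]
      refine ⟨?_, ?_⟩
      · rw [ih1, hgD, if_neg hp, hany, hfil, hg, if_neg hpf']
      · rw [ih2, hgD, if_neg hp, hfil]

-- the canonical per-block update both programs compute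
def pvBlock (L : List String) (e : PySem.Dict String (PySem.Set String)) (s : String) : PySem.Dict String (PySem.Set String) :=
  if L.filter (fun l => is_yellow_move s l) = [] then e
  else e.insert s ((e.getD s PySem.Set.empty).update (L.filter (fun l => is_yellow_move s l)))

theorem astep_eq (S L : List String) (e : PySem.Dict String (PySem.Set String)) :
    S.foldl (fun edges shorter =>
      L.foldl (fun edges longer =>
        if is_yellow_move shorter longer then
          edges.insert shorter ((edges.getD shorter PySem.Set.empty).add longer)
        else edges) edges) e
    = S.foldl (pvBlock L) e := by
  refine PySem.List.foldl_congr_mem' S _ _ e (fun s _ e => ?_)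
  rw [PySem.List.foldl_if_eq_foldl_filter (fun l => is_yellow_move s l)
    (fun edges longer => edges.insert s ((edges.getD s PySem.Set.empty).add longer)) L e]
  have : (L.filter (fun l => is_yellow_move s l)).foldl
      (fun edges longer => edges.insert s ((edges.getD s PySem.Set.empty).add longer)) e
      = (L.filter (fun l => is_yellow_move s l)).foldl (fun e l => pvIns e s l) e := rfl
  rw [this, foldl_pvIns, pvBlock]

theorem bstep_eq (S L : List String) (e : PySem.Dict String (PySem.Set String)) :
    S.foldl (fun edges shorter =>
      match (L.foldl (fun hits longer =>
          (pvDeletions longer.toList).foldl (fun hits del =>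
            if (PySem.Set.ofList S).contains del then
              hits.insert del ((hits.getD del PySem.Set.empty).add longer)
            else hits) hits) PySem.Dict.empty).get? shorter with
      | some ns => edges.insert shorter ((edges.getD shorter PySem.Set.empty).update ns)
      | none => edges) e
    = S.foldl (pvBlock L) e := by
  refine PySem.List.foldl_congr_mem' S _ _ e (fun s hs e => ?_)
  have hcontains : (PySem.Set.ofList S).contains s = true := by
    show (PySem.Set.ofList S).contains s = true
    exact List.contains_iff_mem.mpr ((PySem.Set.mem_ofList S s).mpr hs)
  have hfold : (L.foldl (fun hits longer =>
      (pvDeletions longer.toList).foldl (fun hits del =>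
        if (PySem.Set.ofList S).contains del then
          hits.insert del ((hits.getD del PySem.Set.empty).add longer)
        else hits) hits) PySem.Dict.empty)
      = L.foldl (fun h longer => (pvDeletions longer.toList).foldl
          (fun h del => if (PySem.Set.ofList S).contains del then pvIns h del longer else h) h) PySem.Dict.empty := rfl
  rw [hfold]
  obtain ⟨h1, _⟩ := hits_spec (PySem.Set.ofList S) s L PySem.Dict.empty
  rw [h1, PySem.Dict.get?_empty, PySem.Dict.getD_empty]
  have hPy : ∀ l, pvP (PySem.Set.ofList S) s l = is_yellow_move s l := by
    intro l
    rw [pvP, hcontains, Bool.true_and]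
    cases hy : is_yellow_move s l with
    | true => exact List.contains_iff_mem.mpr ((yellow_iff_mem_deletions s l).mp hy)
    | false =>
      rw [← Bool.not_eq_true]
      intro hc
      have := (yellow_iff_mem_deletions s l).mpr (List.contains_iff_mem.mp hc)
      rw [hy] at this
      simp at this
  have hany : L.any (pvP (PySem.Set.ofList S) s) = L.any (fun l => is_yellow_move s l) :=
    PySem.List.any_congr_mem (fun l _ => hPy l)
  have hfil : L.filter (pvP (PySem.Set.ofList S) s) = L.filter (fun l => is_yellow_move s l) :=
    List.filter_congr (fun l _ => hPy l)
  rw [hany, hfil]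
  by_cases ha : L.any (fun l => is_yellow_move s l) = true
  · rw [if_pos ha]
    have hM : L.filter (fun l => is_yellow_move s l) ≠ [] := by
      obtain ⟨x, hx, hpx⟩ := List.any_eq_true.mp ha
      intro hnil
      exact (List.filter_eq_nil_iff.mp hnil) x hx (by simpa using hpx)
    show e.insert s ((e.getD s PySem.Set.empty).update
        ((PySem.Set.empty : PySem.Set String).update (L.filter (fun l => is_yellow_move s l)))) = _
    rw [show ((PySem.Set.empty : PySem.Set String).update (L.filter (fun l => is_yellow_move s l)))
        = PySem.Set.ofList (L.filter (fun l => is_yellow_move s l)) from rfl,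
      update_ofList, pvBlock, if_neg hM]
  · rw [if_neg ha]
    have hM : L.filter (fun l => is_yellow_move s l) = [] := by
      rw [List.filter_eq_nil_iff]
      intro a haL
      have := (List.any_eq_false.mp (by simpa using ha)) a haL
      simpa using this
    show e = _
    rw [pvBlock, if_pos hM]

-- ===== VERDICT (by name: the statement is the Claim_ definition above) =====
theorem build_yellow_edges_spec : Claim_equal_build_yellow_edges := by
  unfold Claim_equal_build_yellow_edges
  intro w _
  unfold Spec_build_yellow_edges build_yellow_edges build_yellow_edges_alt
  dsimp only
  refine congrArg (fun e : PySem.Dict String (PySem.Set String) =>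
    e.items.map (fun p => (p.1, PySem.List.sorted p.2 (fun x => x) false))) ?_
  refine PySem.List.foldl_congr_mem' _ _ _ _ (fun length _ e => ?_)
  by_cases hS : (PySem.Dict.mk w).getD length [] = []
  · rw [if_pos (Or.inl hS), hS]
    simp
  · by_cases hL : (PySem.Dict.mk w).getD (length + 1) [] = []
    · rw [if_pos (Or.inr hL), hL]
      refine Eq.symm ?_
      simp only [List.foldl_nil, PySem.Dict.get?_empty]
      rw [PySem.List.foldl_ignore]
    · rw [if_neg (fun hor => hor.elim hS hL), astep_eq, ← bstep_eq]
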